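-- pv_equiv track=rewrite | github.com/AndreyIh/Solved_from_chekio | Electronic Station/find_sequence.py | mat_diag1
-- ===== SOURCE A (Python) =====
-- def mat_diag1(m):
--     for i in range(0, (len(m)-3)):
--         for j in range(0, (len(m)-3)):
--             k = (i if i > j else j)
--             z = [m[i+z][j+z] for z in range(0, len(m)-k)]
--             for el in range (0, len(z)):
--                 if el == 0:
--                     m0 = z[0]
--                     n = 1
--                 elif m0 == z[el]:
--                     n += 1
--                     if n >= 4:
--                         return True
--                 else:
--                     m0 = z[el]
--                     n = 1
--     return False
-- ===== SOURCE B (Python) =====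
-- def mat_diag1(m):
--     n = len(m)
--     if n < 4:
--         return False
--     prev = [1] * n
--     for i in range(1, n):
--         row, above = m[i], m[i - 1]
--         cur = [1]
--         for j in range(1, n):
--             if row[j] == above[j - 1]:
--                 r = prev[j - 1] + 1
--                 if r >= 4:
--                     return True
--                 cur.append(r)
--             else:
--                 cur.append(1)
--         prev = cur
--     return False
-- ===== Notes on version B (the rewrite author's own statement) =====
-- stated objective: faster
-- what changed: Replaces A's triple loop (re-scanning a full diagonal with a run counter for every start cell (i,j), O(n^3)) by a single row-by-row dynamic-programming pass that keeps, per column, the length of the run of equal values ending on the current diagonal cell, O(n^2).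
-- outside the precondition, e.g. on mat_diag1([[1, 0, 0, 0], [0, 1], [0, 0, 1, 0], [0, 0, 0, 1]]): A returns True, B raises IndexError
import Mathlib
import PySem

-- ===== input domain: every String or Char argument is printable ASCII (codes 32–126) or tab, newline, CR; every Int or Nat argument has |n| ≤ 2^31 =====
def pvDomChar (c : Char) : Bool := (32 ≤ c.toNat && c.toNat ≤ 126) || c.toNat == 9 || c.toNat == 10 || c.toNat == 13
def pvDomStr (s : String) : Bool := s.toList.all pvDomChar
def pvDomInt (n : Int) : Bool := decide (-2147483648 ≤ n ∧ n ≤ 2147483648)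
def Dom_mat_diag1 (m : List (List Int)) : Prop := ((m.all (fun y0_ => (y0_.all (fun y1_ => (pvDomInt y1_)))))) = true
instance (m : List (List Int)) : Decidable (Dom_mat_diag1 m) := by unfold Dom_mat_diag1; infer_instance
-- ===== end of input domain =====

-- B replaces A's triple loop (a fresh run-counter scan of a whole diagonal for every
-- start cell, O(n^3)) by one row-by-row DP pass keeping per-column diagonal run lengths, O(n^2).

-- ===== PORT A =====
-- inner 'for el in range(0, len(z))' loop of A; state (m0, n) (here m0, cnt), 'return True' = true.
-- In Python m0/n persist across diagonals, but the el = 0 iteration (always first when z ≠ [])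
-- re-initialises them, and for z = [] the loop body never runs, so a fresh (0, 0) start state
-- is faithful.
def pvInnerA (z : List Int) : List Int → Int → Int → Bool
  | [], _, _ => false
  | el :: rest, m0, cnt =>
    if el = 0 then pvInnerA z rest (PySem.List.pyGetD z 0 0) 1
    else if m0 = PySem.List.pyGetD z el 0 then
      (if cnt + 1 ≥ 4 then true else pvInnerA z rest m0 (cnt + 1))
    else pvInnerA z rest (PySem.List.pyGetD z el 0) 1

def mat_diag1 (m : List (List Int)) : Bool :=
  (PySem.List.pyRange 0 ((m.length : Int) - 3) 1).any (fun i =>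
    (PySem.List.pyRange 0 ((m.length : Int) - 3) 1).any (fun j =>
      let k := if i > j then i else j
      let z := (PySem.List.pyRange 0 ((m.length : Int) - k) 1).map
        (fun t => PySem.List.pyGetD (PySem.List.pyGetD m (i + t) []) (j + t) 0)
      pvInnerA z (PySem.List.pyRange 0 (z.length : Int) 1) 0 0))

-- ===== PORT B =====
-- inner 'for j in range(1, n)' loop of B; cur is the accumulator list, none = 'return True'
def pvRowB (prev row above : List Int) : List Int → List Int → Option (List Int)
  | [], cur => some cur
  | j :: js, cur =>
    if PySem.List.pyGetD row j 0 = PySem.List.pyGetD above (j - 1) 0 then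
      let r := PySem.List.pyGetD prev (j - 1) 0 + 1
      if r ≥ 4 then none else pvRowB prev row above js (cur ++ [r])
    else pvRowB prev row above js (cur ++ [1])

-- outer 'for i in range(1, n)' loop of B, carrying prev
def pvOuterB (m : List (List Int)) : List Int → List Int → Bool
  | [], _ => false
  | i :: is, prev =>
    let row := PySem.List.pyGetD m i []
    let above := PySem.List.pyGetD m (i - 1) []
    match pvRowB prev row above (PySem.List.pyRange 1 (m.length : Int) 1) [1] with
    | none => true
    | some cur => pvOuterB m is cur

def mat_diag1_alt (m : List (List Int)) : Bool :=
  if m.length < 4 then false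
  else pvOuterB m (PySem.List.pyRange 1 (m.length : Int) 1) (List.replicate m.length 1)

-- ===== PRECONDITION & SPEC =====
-- Pre_ excludes ragged matrices with 4 or more rows where some row is shorter than the row
-- count: there Python A raises IndexError while building a diagonal (or, if a run of four is
-- found on an earlier diagonal, returns before reaching the short row, where B raises).
def Pre_mat_diag1 (m : List (List Int)) : Prop :=
  m.length ≤ 3 ∨ ∀ row ∈ m, m.length ≤ row.length
instance (m : List (List Int)) : Decidable (Pre_mat_diag1 m) := by
  unfold Pre_mat_diag1; infer_instance

def pvWitness_mat_diag1 : List (List Int) :=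
  [[1, 2, 3, 4], [5, 1, 7, 8], [9, 2, 1, 3], [4, 5, 6, 1]]

def Spec_mat_diag1 (m : List (List Int)) (out : Bool) : Prop := out = mat_diag1_alt m
instance (m : List (List Int)) (out : Bool) : Decidable (Spec_mat_diag1 m out) := by
  unfold Spec_mat_diag1; infer_instance

-- ===== CLAIM (what is proved, stated in full; the proofs are below) =====
def Claim_equal_mat_diag1 : Prop :=
  ∀ (m : List (List Int)), Dom_mat_diag1 m → Pre_mat_diag1 m → Spec_mat_diag1 m (mat_diag1 m)

-- ===== LEMMAS AND PROOFS =====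

-- cell (r, c) of the matrix as both ports read it (List.getD with defaults)
def cellM (m : List (List Int)) (r c : Nat) : Int := (m.getD r []).getD c 0

-- four equal cells going down-right from (r, c): the common specification
def QuadM (m : List (List Int)) (r c : Nat) : Prop :=
  cellM m r c = cellM m (r+1) (c+1) ∧ cellM m (r+1) (c+1) = cellM m (r+2) (c+2) ∧
    cellM m (r+2) (c+2) = cellM m (r+3) (c+3)

-- length of the initial block of elements equal to m0
def leadC (m0 : Int) : List Int → Nat
  | [] => 0
  | x :: r => if x = m0 then leadC m0 r + 1 else 0

-- 'somewhere in z there are 4 equal consecutive elements'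
def good4 : List Int → Bool
  | [] => false
  | x :: r => decide (3 ≤ leadC x r) || good4 r

-- four equal consecutive elements of a list starting at position t
def QuadL (z : List Int) (t : Nat) : Prop :=
  t + 3 < z.length ∧ z.getD t 0 = z.getD (t+1) 0 ∧ z.getD (t+1) 0 = z.getD (t+2) 0 ∧
    z.getD (t+2) 0 = z.getD (t+3) 0

-- diagonal run length ending at (i, j)
def runlen (m : List (List Int)) : Nat → Nat → Nat
  | i+1, j+1 => if cellM m (i+1) (j+1) = cellM m i j then runlen m i j + 1 else 1
  | _, _ => 1

theorem runlen_zero_left (m : List (List Int)) (j : Nat) : runlen m 0 j = 1 := by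
  cases j <;> rfl

theorem runlen_zero_right (m : List (List Int)) (i : Nat) : runlen m i 0 = 1 := by
  cases i <;> rfl

theorem runlen_pos (m : List (List Int)) (i j : Nat) : 1 ≤ runlen m i j := by
  match i, j with
  | i+1, j+1 => rw [runlen]; split <;> omega
  | 0, j => rw [runlen_zero_left]
  | i+1, 0 => rw [runlen_zero_right]

theorem runlen_ge4_iff (m : List (List Int)) (i j : Nat) :
    4 ≤ runlen m i j ↔ ∃ r c, i = r + 3 ∧ j = c + 3 ∧ QuadM m r c := by
  constructor
  · intro h
    match i, j with
    | 0, j => rw [runlen_zero_left] at h; omega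
    | i+1, 0 => rw [runlen_zero_right] at h; omega
    | i+1, j+1 =>
      rw [runlen] at h
      split at h
      case isFalse => omega
      case isTrue h1 =>
        match i, j with
        | 0, j => rw [runlen_zero_left] at h; omega
        | i+1, 0 => rw [runlen_zero_right] at h; omega
        | i+1, j+1 =>
          rw [runlen] at h
          split at h
          case isFalse => omega
          case isTrue h2 =>
            match i, j with
            | 0, j => rw [runlen_zero_left] at h; omega
            | i+1, 0 => rw [runlen_zero_right] at h; omega
            | i+1, j+1 =>
              rw [runlen] at h
              split at h
              case isFalse => omega
              case isTrue h3 =>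
                exact ⟨i, j, rfl, rfl, h3.symm, h2.symm, h1.symm⟩
  · rintro ⟨r, c, rfl, rfl, e1, e2, e3⟩
    rw [runlen, if_pos e3.symm, runlen, if_pos e2.symm, runlen, if_pos e1.symm]
    have := runlen_pos m r c
    omega

-- ----- A-side -----

theorem leadC_ge3_iff (x : Int) (r : List Int) :
    3 ≤ leadC x r ↔ 3 ≤ r.length ∧ x = r.getD 0 0 ∧ r.getD 0 0 = r.getD 1 0 ∧
      r.getD 1 0 = r.getD 2 0 := by
  rcases r with _ | ⟨a, _ | ⟨b, _ | ⟨c, r'⟩⟩⟩ <;> simp [leadC] <;> split_ifs <;>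
    simp_all <;> omega

theorem quadL_cons_succ (x : Int) (r : List Int) (t : Nat) :
    QuadL (x :: r) (t+1) ↔ QuadL r t := by
  simp only [QuadL, List.length_cons, List.getD_cons_succ]
  constructor <;> rintro ⟨h, e⟩ <;> exact ⟨by omega, e⟩

theorem quadL_cons_zero (x : Int) (r : List Int) :
    QuadL (x :: r) 0 ↔ 3 ≤ leadC x r := by
  rw [leadC_ge3_iff]
  simp only [QuadL, List.length_cons, List.getD_cons_succ, List.getD_cons_zero]
  constructor <;> rintro ⟨h, e⟩ <;> exact ⟨by omega, e⟩

theorem good4_iff (z : List Int) : good4 z = true ↔ ∃ t, QuadL z t := by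
  induction z with
  | nil => simp [good4, QuadL]
  | cons x r ih =>
    rw [good4, Bool.or_eq_true, decide_eq_true_iff, ih]
    constructor
    · rintro (h | ⟨t, ht⟩)
      · exact ⟨0, (quadL_cons_zero x r).mpr h⟩
      · exact ⟨t + 1, (quadL_cons_succ x r t).mpr ht⟩
    · rintro ⟨t, ht⟩
      rcases t with _ | t
      · exact Or.inl ((quadL_cons_zero x r).mp ht)
      · exact Or.inr ⟨t, (quadL_cons_succ x r t).mp ht⟩

theorem innerA_drop (z : List Int) (l : List Int) :
    ∀ (t : Nat) (m0 cnt : Int), 1 ≤ cnt → cnt ≤ 3 → 1 ≤ t → z.drop t = l →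
    pvInnerA z (PySem.List.pyRange (t : Int) (z.length : Int) 1) m0 cnt
      = (decide (4 ≤ cnt + (leadC m0 l : Int)) || good4 l) := by
  induction l with
  | nil =>
    intro t m0 cnt h1 h3 ht hd
    have hlen : z.length ≤ t := List.drop_eq_nil_iff.mp hd
    rw [PySem.List.pyRange_one_eq_nil (by exact_mod_cast hlen)]
    simp [pvInnerA, good4, leadC]
    omega
  | cons x rest ih =>
    intro t m0 cnt h1 h3 ht hd
    have htlen : t < z.length := by
      by_contra hc
      rw [List.drop_eq_nil_of_le (by omega)] at hd
      simp at hd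
    have hx : z.getD t 0 = x := by
      have h0 : (z.drop t)[0]? = some x := by rw [hd]; rfl
      rw [List.getElem?_drop] at h0
      simp only [Nat.add_zero] at h0
      simp [List.getD_eq_getElem?_getD, h0]
    have hrest : z.drop (t + 1) = rest := by
      have h0 : List.drop 1 (z.drop t) = rest := by rw [hd]; rfl
      rw [List.drop_drop] at h0
      exact h0
    rw [PySem.List.pyRange_one_cons (by exact_mod_cast htlen)]
    rw [show ((t : Int) + 1) = (((t + 1 : Nat)) : Int) from by push_cast; ring]
    rw [pvInnerA]
    rw [if_neg (by omega : ¬ ((t : Int) = 0))]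
    have hget : PySem.List.pyGetD z (t : Int) 0 = x := by
      rw [PySem.List.pyGetD_natCast, hx]
    rw [hget]
    by_cases hm : m0 = x
    · rw [if_pos hm]
      subst hm
      have hlead : leadC m0 (m0 :: rest) = leadC m0 rest + 1 := by simp [leadC]
      by_cases h4 : cnt + 1 ≥ 4
      · rw [if_pos h4]
        have : decide (4 ≤ cnt + (leadC m0 (m0 :: rest) : Int)) = true := by
          rw [hlead]; push_cast; simp; omega
        rw [this, Bool.true_or]
      · rw [if_neg h4]
        rw [ih (t + 1) m0 (cnt + 1) (by omega) (by omega) (by omega) hrest]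
        rw [hlead, good4]
        by_cases hL : 3 ≤ leadC m0 rest
        · have d1 : decide (4 ≤ cnt + 1 + (leadC m0 rest : Int)) = true := by
            simp; omega
          have d2 : decide (4 ≤ cnt + ((leadC m0 rest + 1 : Nat) : Int)) = true := by
            simp; omega
          rw [d1, d2, decide_eq_true hL]
          simp
        · have d0 : decide (3 ≤ leadC m0 rest) = false := by simpa using hL
          rw [d0, Bool.false_or]
          congr 1
          rw [decide_eq_decide]
          omega
    · rw [if_neg hm]
      rw [ih (t + 1) x 1 (by omega) (by omega) (by omega) hrest]
      have hxm : ¬ x = m0 := fun h => hm h.symm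
      have hlead : leadC m0 (x :: rest) = 0 := by simp [leadC, hxm]
      rw [hlead, good4]
      have d0 : decide (4 ≤ cnt + ((0 : Nat) : Int)) = false := by simp; omega
      rw [d0, Bool.false_or]
      congr 1
      rw [decide_eq_decide]
      omega

theorem innerA_top (z : List Int) :
    pvInnerA z (PySem.List.pyRange 0 (z.length : Int) 1) 0 0 = good4 z := by
  rcases z with _ | ⟨x, r⟩
  · rw [PySem.List.pyRange_one_eq_nil (by simp)]
    rfl
  · rw [PySem.List.pyRange_one_cons (by simp)]
    rw [pvInnerA, if_pos rfl, PySem.List.pyGetD_zero_cons]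
    rw [show ((0 : Int) + 1) = ((1 : Nat) : Int) by norm_num]
    rw [innerA_drop (x :: r) r 1 x 1 (by omega) (by omega) (by omega) rfl]
    rw [good4]
    congr 1
    rw [decide_eq_decide]
    omega

theorem diag_getD (m : List (List Int)) (a b : Nat) (kI : Int) (u : Nat)
    (hu : (u : Int) < (m.length : Int) - kI) :
    ((PySem.List.pyRange 0 ((m.length : Int) - kI) 1).map
      (fun t => PySem.List.pyGetD (PySem.List.pyGetD m ((a : Int) + t) []) ((b : Int) + t) 0)).getD u 0
      = cellM m (a + u) (b + u) := by
  have hlen : u < ((PySem.List.pyRange 0 ((m.length : Int) - kI) 1).map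
      (fun t => PySem.List.pyGetD (PySem.List.pyGetD m ((a : Int) + t) []) ((b : Int) + t) 0)).length := by
    rw [List.length_map, PySem.List.length_pyRange_one]
    omega
  rw [List.getD_eq_getElem _ _ hlen, List.getElem_map, PySem.List.getElem_pyRange_one]
  rw [show (a : Int) + ((0 : Int) + (u : Int)) = ((a + u : Nat) : Int) from by push_cast; ring]
  rw [show (b : Int) + ((0 : Int) + (u : Int)) = ((b + u : Nat) : Int) from by push_cast; ring]
  rw [PySem.List.pyGetD_natCast, PySem.List.pyGetD_natCast]
  rfl

theorem mat_diag1_iff (m : List (List Int)) :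
    mat_diag1 m = true ↔
      ∃ r c : Nat, r + 3 < m.length ∧ c + 3 < m.length ∧ QuadM m r c := by
  rw [mat_diag1]
  simp only [List.any_eq_true, PySem.List.mem_pyRange_one, innerA_top, good4_iff]
  constructor
  · rintro ⟨i, ⟨hi0, hin⟩, j, ⟨hj0, hjn⟩, t, htq⟩
    lift i to ℕ using hi0 with a
    lift j to ℕ using hj0 with b
    rw [show (if (a : Int) > (b : Int) then (a : Int) else (b : Int)) = ((max a b : Nat) : Int)
      from by split_ifs <;> push_cast <;> omega] at htq
    obtain ⟨ht, e1, e2, e3⟩ := htq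
    rw [List.length_map, PySem.List.length_pyRange_one] at ht
    have hb : ∀ u : Nat, u ≤ t + 3 → (u : Int) < (m.length : Int) - ((max a b : Nat) : Int) := by
      intro u hu; omega
    rw [diag_getD m a b _ t (hb t (by omega)), diag_getD m a b _ (t+1) (hb (t+1) (by omega))] at e1
    rw [diag_getD m a b _ (t+1) (hb (t+1) (by omega)), diag_getD m a b _ (t+2) (hb (t+2) (by omega))] at e2
    rw [diag_getD m a b _ (t+2) (hb (t+2) (by omega)), diag_getD m a b _ (t+3) (hb (t+3) (by omega))] at e3
    refine ⟨a + t, b + t, by omega, by omega, ?_, ?_, ?_⟩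
    · rw [show a + t + 1 = a + (t+1) from by omega, show b + t + 1 = b + (t+1) from by omega]
      exact e1
    · rw [show a + t + 1 = a + (t+1) from by omega, show b + t + 1 = b + (t+1) from by omega,
        show a + t + 2 = a + (t+2) from by omega, show b + t + 2 = b + (t+2) from by omega]
      exact e2
    · rw [show a + t + 2 = a + (t+2) from by omega, show b + t + 2 = b + (t+2) from by omega,
        show a + t + 3 = a + (t+3) from by omega, show b + t + 3 = b + (t+3) from by omega]
      exact e3
  · rintro ⟨r, c, hr, hc, e1, e2, e3⟩
    refine ⟨((r - min r c : Nat) : Int), ⟨by positivity, by omega⟩,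
      ((c - min r c : Nat) : Int), ⟨by positivity, by omega⟩, min r c, ?_⟩
    set a : Nat := r - min r c with ha
    set b : Nat := c - min r c with hbdef
    rw [show (if (a : Int) > (b : Int) then (a : Int) else (b : Int)) = ((max a b : Nat) : Int)
      from by split_ifs <;> push_cast <;> omega]
    unfold QuadL
    rw [List.length_map, PySem.List.length_pyRange_one]
    have hb : ∀ u : Nat, u ≤ min r c + 3 → (u : Int) < (m.length : Int) - ((max a b : Nat) : Int) := by
      intro u hu; omega
    refine ⟨by omega, ?_, ?_, ?_⟩
    · rw [diag_getD m a b _ (min r c) (hb _ (by omega)),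
        diag_getD m a b _ (min r c + 1) (hb _ (by omega)),
        show a + min r c = r from by omega, show b + min r c = c from by omega,
        show a + (min r c + 1) = r + 1 from by omega, show b + (min r c + 1) = c + 1 from by omega]
      exact e1
    · rw [diag_getD m a b _ (min r c + 1) (hb _ (by omega)),
        diag_getD m a b _ (min r c + 2) (hb _ (by omega)),
        show a + (min r c + 1) = r + 1 from by omega, show b + (min r c + 1) = c + 1 from by omega,
        show a + (min r c + 2) = r + 2 from by omega, show b + (min r c + 2) = c + 2 from by omega]
      exact e2
    · rw [diag_getD m a b _ (min r c + 2) (hb _ (by omega)),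
        diag_getD m a b _ (min r c + 3) (hb _ (by omega)),
        show a + (min r c + 2) = r + 2 from by omega, show b + (min r c + 2) = c + 2 from by omega,
        show a + (min r c + 3) = r + 3 from by omega, show b + (min r c + 3) = c + 3 from by omega]
      exact e3

-- ----- B-side -----

theorem rowB_spec (m : List (List Int)) (a : Nat) :
    ∀ (d t : Nat) (cur : List Int), 1 ≤ t → t + d = m.length →
    cur = (List.range t).map (fun j => (runlen m (a+1) j : Int)) →
    pvRowB ((List.range m.length).map (fun j => (runlen m a j : Int)))
        (m.getD (a+1) []) (m.getD a [])
        (PySem.List.pyRange (t : Int) (m.length : Int) 1) cur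
      = if (List.range' t d).any (fun j => decide (4 ≤ runlen m (a+1) j)) then none
        else some ((List.range m.length).map (fun j => (runlen m (a+1) j : Int))) := by
  intro d
  induction d with
  | zero =>
    intro t cur h1 hlen hcur
    rw [PySem.List.pyRange_one_eq_nil (by exact_mod_cast le_of_eq hlen.symm)]
    have : t = m.length := by omega
    subst this
    simp [pvRowB, hcur]
  | succ d ih =>
    intro t cur h1 hlen hcur
    have htlen : t < m.length := by omega
    rw [PySem.List.pyRange_one_cons (by exact_mod_cast htlen)]
    rw [show ((t : Int) + 1) = (((t + 1 : Nat)) : Int) from by push_cast; ring]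
    obtain ⟨b, rfl⟩ : ∃ b, t = b + 1 := ⟨t - 1, by omega⟩
    simp only [pvRowB]
    rw [show (((b + 1 : Nat) : Int) - 1) = ((b : Nat) : Int) from by push_cast; ring]
    simp only [PySem.List.pyGetD_natCast]
    rw [PySem.List.getD_map_range _ _ _ _ (by omega : b < m.length)]
    have hcell : ((m.getD (a+1) []).getD (b+1) 0 = (m.getD a []).getD b 0)
        ↔ (cellM m (a+1) (b+1) = cellM m a b) := Iff.rfl
    have hrun : runlen m (a+1) (b+1)
        = if cellM m (a+1) (b+1) = cellM m a b then runlen m a b + 1 else 1 := rfl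
    by_cases hc : cellM m (a+1) (b+1) = cellM m a b
    · rw [if_pos (hcell.mpr hc)]
      by_cases h4 : ((runlen m a b : Int) + 1 ≥ 4)
      · rw [if_pos h4]
        have hany : (List.range' (b+1) (d+1)).any (fun j => decide (4 ≤ runlen m (a+1) j)) = true := by
          rw [List.range'_succ]
          simp only [List.any_cons, Bool.or_eq_true, decide_eq_true_iff]
          left; rw [hrun, if_pos hc]; omega
        rw [hany]
        simp
      · rw [if_neg h4]
        rw [ih (b + 2) _ (by omega) (by omega) (by
          rw [show b + 2 = (b + 1) + 1 from rfl, List.range_succ, List.map_append, ← hcur]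
          simp only [List.map_cons, List.map_nil]
          congr 2
          rw [hrun, if_pos hc]
          push_cast; ring)]
        have hn4 : ¬ (4 ≤ runlen m (a+1) (b+1)) := by rw [hrun, if_pos hc]; omega
        rw [show (List.range' (b+1) (d+1)).any (fun j => decide (4 ≤ runlen m (a+1) j))
            = (List.range' (b+2) d).any (fun j => decide (4 ≤ runlen m (a+1) j)) from by
          rw [List.range'_succ]; simp [hn4]]
    · rw [if_neg (fun h => hc (hcell.mp h))]
      rw [ih (b + 2) _ (by omega) (by omega) (by
        rw [show b + 2 = (b + 1) + 1 from rfl, List.range_succ, List.map_append, ← hcur]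
        simp only [List.map_cons, List.map_nil]
        congr 2
        rw [hrun, if_neg hc]
        norm_num)]
      have hn4 : ¬ (4 ≤ runlen m (a+1) (b+1)) := by rw [hrun, if_neg hc]; omega
      rw [show (List.range' (b+1) (d+1)).any (fun j => decide (4 ≤ runlen m (a+1) j))
          = (List.range' (b+2) d).any (fun j => decide (4 ≤ runlen m (a+1) j)) from by
        rw [List.range'_succ]; simp [hn4]]

theorem outerB_spec (m : List (List Int)) :
    ∀ (d t : Nat), 1 ≤ t → t + d = m.length →
    pvOuterB m (PySem.List.pyRange (t : Int) (m.length : Int) 1)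
        ((List.range m.length).map (fun j => (runlen m (t-1) j : Int)))
      = (List.range' t d).any
          (fun i => (List.range m.length).any (fun j => decide (4 ≤ runlen m i j))) := by
  intro d
  induction d with
  | zero =>
    intro t h1 hlen
    rw [PySem.List.pyRange_one_eq_nil (by exact_mod_cast le_of_eq hlen.symm)]
    rfl
  | succ d ih =>
    intro t h1 hlen
    have htlen : t < m.length := by omega
    rw [PySem.List.pyRange_one_cons (by exact_mod_cast htlen)]
    rw [show ((t : Int) + 1) = (((t + 1 : Nat)) : Int) from by push_cast; ring]
    obtain ⟨a, rfl⟩ : ∃ a, t = a + 1 := ⟨t - 1, by omega⟩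
    simp only [pvOuterB]
    rw [show (((a + 1 : Nat) : Int) - 1) = ((a : Nat) : Int) from by push_cast; ring]
    simp only [PySem.List.pyGetD_natCast]
    rw [show a + 1 - 1 = a from by omega]
    rw [show (PySem.List.pyRange 1 (m.length : Int) 1)
        = (PySem.List.pyRange (((1 : Nat)) : Int) (m.length : Int) 1) from by norm_num]
    rw [rowB_spec m a (m.length - 1) 1 [1] (by omega) (by omega)
      (by simp [runlen_zero_right])]
    have hsplit : (List.range m.length).any (fun j => decide (4 ≤ runlen m (a+1) j))
        = (decide (4 ≤ runlen m (a+1) 0)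
            || (List.range' 1 (m.length - 1)).any (fun j => decide (4 ≤ runlen m (a+1) j))) := by
      rw [List.range_eq_range', show m.length = (m.length - 1) + 1 from by omega, List.range'_succ]
      simp
    by_cases hP : (List.range' 1 (m.length - 1)).any (fun j => decide (4 ≤ runlen m (a+1) j)) = true
    · rw [if_pos hP, List.range'_succ]
      simp only [List.any_cons]
      rw [hsplit, hP]
      simp
    · rw [if_neg (by simpa using hP)]
      dsimp only
      have ih' := ih (a + 2) (by omega) (by omega)
      rw [show a + 2 - 1 = a + 1 from by omega] at ih'
      rw [show ((a : Nat) + 1 + 1 : Nat) = (a + 2 : Nat) from by omega, ih']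
      rw [List.range'_succ]
      simp only [List.any_cons]
      rw [hsplit]
      have h0 : decide (4 ≤ runlen m (a+1) 0) = false := by
        simp [runlen_zero_right]
      rw [h0, Bool.false_or, (by simpa using hP : (List.range' 1 (m.length - 1)).any
        (fun j => decide (4 ≤ runlen m (a+1) j)) = false), Bool.false_or]

theorem mat_diag1_alt_iff (m : List (List Int)) :
    mat_diag1_alt m = true ↔
      ∃ r c : Nat, r + 3 < m.length ∧ c + 3 < m.length ∧ QuadM m r c := by
  rw [mat_diag1_alt]
  by_cases h4 : m.length < 4
  · rw [if_pos h4]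
    constructor
    · intro h; exact absurd h (by simp)
    · rintro ⟨r, c, hr, hc, _⟩
      exact absurd hr (by omega)
  · rw [if_neg h4]
    rw [show List.replicate m.length (1 : Int)
        = (List.range m.length).map (fun j => (runlen m (1-1) j : Int)) from by
      simp [runlen_zero_left]]
    rw [show (PySem.List.pyRange 1 (m.length : Int) 1)
        = (PySem.List.pyRange (((1 : Nat)) : Int) (m.length : Int) 1) from by norm_num]
    rw [outerB_spec m (m.length - 1) 1 (by omega) (by omega)]
    simp only [List.any_eq_true, List.mem_range'_1, List.mem_range, decide_eq_true_iff]
    constructor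
    · rintro ⟨i, ⟨hi1, hi2⟩, j, hj, hrl⟩
      obtain ⟨r, c, rfl, rfl, hq⟩ := (runlen_ge4_iff m i j).mp hrl
      exact ⟨r, c, by omega, by omega, hq⟩
    · rintro ⟨r, c, hr, hc, hq⟩
      refine ⟨r + 3, ⟨by omega, by omega⟩, c + 3, by omega, ?_⟩
      exact (runlen_ge4_iff m (r+3) (c+3)).mpr ⟨r, c, rfl, rfl, hq⟩

-- ===== VERDICT (by name: the statement is the Claim_ definition above) =====
theorem mat_diag1_spec : Claim_equal_mat_diag1 := by
  intro m _ _
  unfold Spec_mat_diag1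
  rw [Bool.eq_iff_iff, mat_diag1_iff, mat_diag1_alt_iff]
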